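-- pv_equiv track=rewrite | github.com/mpomarlan/aics2022 | testing.py | argMaxUnique
-- ===== SOURCE A (Python) =====
-- def argMaxUnique(d):
--     maxval = None
--     argmax = []
--     for k, v in d.items():
--         if (None == maxval) or (maxval < v):
--             argmax = [k]
--             maxval = v
--         elif maxval == v:
--             argmax.append(k)
--     if 1 == len(argmax):
--         return argmax[0]
--     return None
-- ===== SOURCE B (Python) =====
-- def argMaxUnique(d):
--     if not d:
--         return None
--     m = max(d.values())
--     am = [k for k, v in d.items() if v == m]
--     return am[0] if len(am) == 1 else None
-- ===== Notes on version B (the rewrite author's own statement) =====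
-- stated objective: simpler
-- what changed: Replaces the fused single-pass running-max/accumulator loop with a two-pass structure: compute max(d.values()) first, then filter the keys attaining it and return the single key if unique.
import Mathlib
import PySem

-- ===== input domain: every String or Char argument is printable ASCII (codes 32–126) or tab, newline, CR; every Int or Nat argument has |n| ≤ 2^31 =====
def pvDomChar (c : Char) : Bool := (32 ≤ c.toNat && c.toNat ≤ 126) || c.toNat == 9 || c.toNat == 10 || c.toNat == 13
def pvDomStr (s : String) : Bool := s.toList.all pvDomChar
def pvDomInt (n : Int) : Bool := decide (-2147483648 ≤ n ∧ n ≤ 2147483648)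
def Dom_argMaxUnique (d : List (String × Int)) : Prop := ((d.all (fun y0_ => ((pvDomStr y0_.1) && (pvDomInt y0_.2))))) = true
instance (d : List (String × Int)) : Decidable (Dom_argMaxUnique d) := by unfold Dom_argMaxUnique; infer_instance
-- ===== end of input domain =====

-- B computes max(d.values()) first and then filters the keys attaining it (two passes),
-- instead of A's fused running-max/accumulator loop; objective: simpler.


-- ===== PORT A =====
-- loop body of A: state = (maxval, argmax)
def argMaxUniqueStep (s : Option Int × List String) (kv : String × Int) :
    Option Int × List String :=
  match s.1 with
  | none => (some kv.2, [kv.1])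
  | some m =>
      if m < kv.2 then (some kv.2, [kv.1])
      else if m = kv.2 then (s.1, s.2 ++ [kv.1])
      else s

def argMaxUnique (d : List (String × Int)) : Option String :=
  let st := d.foldl argMaxUniqueStep (none, [])
  if st.2.length = 1 then st.2.head? else none

-- ===== PORT B =====
def argMaxUnique_alt (d : List (String × Int)) : Option String :=
  if d.isEmpty then none
  else
    match PySem.List.max? (d.map Prod.snd) (fun y => y) with
    | none => none
    | some m =>
        let am := (d.filter (fun kv => kv.2 = m)).map Prod.fst
        if am.length = 1 then am.head? else none

-- ===== PRECONDITION & SPEC =====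
def Spec_argMaxUnique (d : List (String × Int)) (out : Option String) : Prop := out = argMaxUnique_alt d
instance (d : List (String × Int)) (out : Option String) : Decidable (Spec_argMaxUnique d out) := by unfold Spec_argMaxUnique; infer_instance

-- ===== CLAIM (what is proved, stated in full; the proofs are below) =====
def Claim_equal_argMaxUnique : Prop := ∀ (d : List (String × Int)), Dom_argMaxUnique d → Spec_argMaxUnique d (argMaxUnique d)

-- ===== LEMMAS AND PROOFS =====

theorem le_foldl_maxsnd (t : List (String × Int)) (a : Int) :
    a ≤ t.foldl (fun a kv => max a kv.2) a := by
  induction t generalizing a with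
  | nil => simp
  | cons x t ih => exact le_trans (le_max_left a x.2) (ih (max a x.2))

-- invariant of A's loop, with a started state (some m, acc)
theorem argMaxUnique_loop_inv (t : List (String × Int)) (m : Int) (acc : List String) :
    t.foldl argMaxUniqueStep (some m, acc) =
      (some (t.foldl (fun a kv => max a kv.2) m),
       (if t.foldl (fun a kv => max a kv.2) m = m then acc else []) ++
         (t.filter (fun kv => kv.2 = t.foldl (fun a kv => max a kv.2) m)).map Prod.fst) := by
  induction t generalizing m acc with
  | nil => simp
  | cons kv t ih =>
      by_cases h1 : m < kv.2
      · have hm : max m kv.2 = kv.2 := max_eq_right (le_of_lt h1)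
        have hM := le_foldl_maxsnd t kv.2
        simp only [List.foldl_cons, argMaxUniqueStep, if_pos h1, hm]
        rw [ih kv.2 [kv.1]]
        generalize hg : t.foldl (fun a kv => max a kv.2) kv.2 = M at hM ⊢
        have hne : M ≠ m := by omega
        by_cases h2 : M = kv.2
        · simp [h2]
          intro h; exact absurd (h2.trans h) hne
        · have h2' : ¬ (kv.2 = M) := fun h => h2 h.symm
          simp [h2, hne, h2']
      · by_cases h2 : m = kv.2
        · have hm : max m kv.2 = m := by omega
          simp only [List.foldl_cons, argMaxUniqueStep, if_neg h1, if_pos h2, hm]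
          rw [ih m (acc ++ [kv.1])]
          generalize hg : t.foldl (fun a kv => max a kv.2) m = M
          by_cases h3 : M = m
          · have : kv.2 = M := by omega
            simp [h3, this, List.append_assoc]
          · have : ¬ (kv.2 = M) := by intro h; exact h3 (by omega)
            simp [h3, this]
        · have hm : max m kv.2 = m := by omega
          have hM := le_foldl_maxsnd t m
          simp only [List.foldl_cons, argMaxUniqueStep, if_neg h1, if_neg h2, hm]
          rw [ih m acc]
          generalize hg : t.foldl (fun a kv => max a kv.2) m = M at hM ⊢
          have : ¬ (kv.2 = M) := by intro h; omega
          simp [this]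

-- ===== VERDICT (by name: the statement is the Claim_ definition above) =====
theorem argMaxUnique_spec : Claim_equal_argMaxUnique := by
  intro d _
  unfold Spec_argMaxUnique argMaxUnique argMaxUnique_alt
  cases d with
  | nil => simp
  | cons kv t =>
      simp only [List.foldl_cons, argMaxUniqueStep, List.isEmpty_cons, Bool.false_eq_true,
        if_false, List.map_cons]
      rw [argMaxUnique_loop_inv t kv.2 [kv.1], PySem.List.max?_id_cons, List.foldl_map]
      generalize hg : t.foldl (fun a kv => max a kv.2) kv.2 = M
      by_cases h : M = kv.2
      · subst h
        dsimp only
        rw [List.filter_cons, if_pos (decide_eq_true rfl)]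
        rw [if_pos rfl]
        simp
      · have h' : ¬ (kv.2 = M) := fun hh => h hh.symm
        simp [h, h']
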